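-- pv_equiv track=rewrite | github.com/hiep1810/all-in-one-ai-cli | src/aio/tui/app.py | delete_prev_word
-- ===== SOURCE A (Python) =====
-- def delete_prev_word(input_buffer: str, cursor_pos: int) -> tuple[str, int]:
--     cursor_pos = max(0, min(cursor_pos, len(input_buffer)))
--     if cursor_pos == 0:
--         return input_buffer, cursor_pos
--
--     left = input_buffer[:cursor_pos]
--     right = input_buffer[cursor_pos:]
--     i = len(left)
--
--     while i > 0 and left[i - 1].isspace():
--         i -= 1
--     while i > 0 and not left[i - 1].isspace():
--         i -= 1
--
--     updated = left[:i] + right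
--     return updated, i
-- ===== SOURCE B (Python) =====
-- def delete_prev_word(input_buffer: str, cursor_pos: int) -> tuple[str, int]:
--     cursor_pos = max(0, min(cursor_pos, len(input_buffer)))
--     if cursor_pos == 0:
--         return input_buffer, cursor_pos
--
--     left = input_buffer[:cursor_pos]
--     right = input_buffer[cursor_pos:]
--
--     trimmed = left.rstrip()
--     words = trimmed.split()
--     i = len(trimmed) - len(words[-1]) if words else 0
--
--     return left[:i] + right, i
-- ===== Notes on version B (the rewrite author's own statement) =====
-- stated objective: simpler
-- what changed: The two backward index-decrementing while loops are replaced by whitespace-tokenizing string operations: the word-start index is len(trimmed) - len(trimmed.split()[-1]) where trimmed = left.rstrip().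
import Mathlib
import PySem

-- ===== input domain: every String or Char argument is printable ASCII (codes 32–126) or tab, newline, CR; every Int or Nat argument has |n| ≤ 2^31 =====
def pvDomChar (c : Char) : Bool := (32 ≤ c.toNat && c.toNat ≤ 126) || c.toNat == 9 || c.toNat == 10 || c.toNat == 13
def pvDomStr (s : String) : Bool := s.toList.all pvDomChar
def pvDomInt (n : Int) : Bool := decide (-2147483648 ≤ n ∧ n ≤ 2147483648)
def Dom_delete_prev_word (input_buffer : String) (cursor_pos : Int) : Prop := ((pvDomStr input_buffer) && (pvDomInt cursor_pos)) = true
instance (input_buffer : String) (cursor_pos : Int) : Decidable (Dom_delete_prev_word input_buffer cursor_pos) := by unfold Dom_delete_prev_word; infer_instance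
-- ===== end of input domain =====

-- B replaces A's two backward index-scanning while loops by string operations
-- (rstrip + split) that name the last word directly; objective: simpler.

-- ===== PORT A =====
-- while i > 0 and left[i-1].isspace(): i -= 1   (index i-1 is always in range, so
-- plain getD is exact here)
def dpwLoop1 (left : List Char) : Nat → Nat
  | 0 => 0
  | i+1 => if PySem.Chars.isspace (left.getD i ' ') then dpwLoop1 left i else i+1

-- while i > 0 and not left[i-1].isspace(): i -= 1
def dpwLoop2 (left : List Char) : Nat → Nat
  | 0 => 0
  | i+1 => if PySem.Chars.isspace (left.getD i ' ') then i+1 else dpwLoop2 left i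

def delete_prev_word (input_buffer : String) (cursor_pos : Int) : String × Int :=
  let cp : Int := max 0 (min cursor_pos (PySem.Str.len input_buffer))
  if cp = 0 then (input_buffer, cp)
  else
    let l := input_buffer.toList
    -- cp is clamped into [0, len], so the slices [:cp] and [cp:] are take/drop
    let left := l.take cp.toNat
    let right := l.drop cp.toNat
    let i := dpwLoop2 left (dpwLoop1 left left.length)
    (String.ofList (left.take i ++ right), (i : Int))

-- ===== PORT B =====
def delete_prev_word_alt (input_buffer : String) (cursor_pos : Int) : String × Int :=
  let cp : Int := max 0 (min cursor_pos (PySem.Str.len input_buffer))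
  if cp = 0 then (input_buffer, cp)
  else
    let l := input_buffer.toList
    let left := l.take cp.toNat
    let right := l.drop cp.toNat
    let trimmed := PySem.Chars.rstrip left
    let words := PySem.Chars.split₀ trimmed
    -- words[-1] if words else …  : last element of a nonempty list
    let i := match words.getLast? with
      | none => 0
      | some w => trimmed.length - w.length
    (String.ofList (left.take i ++ right), (i : Int))

-- ===== PRECONDITION & SPEC =====
def Spec_delete_prev_word (input_buffer : String) (cursor_pos : Int) (out : String × Int) : Prop := out = delete_prev_word_alt input_buffer cursor_pos
instance (input_buffer : String) (cursor_pos : Int) (out : String × Int) : Decidable (Spec_delete_prev_word input_buffer cursor_pos out) := by unfold Spec_delete_prev_word; infer_instance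

-- ===== CLAIM (what is proved, stated in full; the proofs are below) =====
def Claim_equal_delete_prev_word : Prop := ∀ (input_buffer : String) (cursor_pos : Int), Dom_delete_prev_word input_buffer cursor_pos → Spec_delete_prev_word input_buffer cursor_pos (delete_prev_word input_buffer cursor_pos)

-- ===== LEMMAS AND PROOFS =====

-- the loops never look at indices ≥ i, so a tail appended after position i is invisible
theorem dpwLoop1_append (l t : List Char) : ∀ i, i ≤ l.length → dpwLoop1 (l ++ t) i = dpwLoop1 l i := by
  intro i
  induction i with
  | zero => intro _; rfl
  | succ k ih =>
    intro h
    have hk : k < l.length := by omega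
    simp [dpwLoop1, List.getElem?_append_left hk, ih (by omega)]

theorem dpwLoop2_append (l t : List Char) : ∀ i, i ≤ l.length → dpwLoop2 (l ++ t) i = dpwLoop2 l i := by
  intro i
  induction i with
  | zero => intro _; rfl
  | succ k ih =>
    intro h
    have hk : k < l.length := by omega
    simp [dpwLoop2, List.getElem?_append_left hk, ih (by omega)]

-- the first loop strips trailing whitespace
theorem dpwLoop1_eq (l : List Char) :
    dpwLoop1 l l.length = (l.reverse.dropWhile PySem.Chars.isspace).length := by
  induction l using List.reverseRecOn with
  | nil => rfl
  | append_singleton l c ih =>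
    by_cases hc : PySem.Chars.isspace c
    · simp [dpwLoop1, List.getD_append_right, hc, dpwLoop1_append l [c] l.length le_rfl, ih,
        List.dropWhile_cons]
    · simp [dpwLoop1, List.getD_append_right, hc, List.dropWhile_cons]

-- the second loop strips trailing non-whitespace
theorem dpwLoop2_eq (l : List Char) :
    dpwLoop2 l l.length = (l.reverse.dropWhile (fun c => !PySem.Chars.isspace c)).length := by
  induction l using List.reverseRecOn with
  | nil => rfl
  | append_singleton l c ih =>
    by_cases hc : PySem.Chars.isspace c
    · simp [dpwLoop2, List.getD_append_right, hc, List.dropWhile_cons]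
    · simp [dpwLoop2, List.getD_append_right, hc, dpwLoop2_append l [c] l.length le_rfl, ih,
        List.dropWhile_cons]

theorem takeWhile_append_cons_of_neg {p : Char → Bool} {y : Char} (xs zs : List Char)
    (hy : p y = false) : List.takeWhile p (xs ++ y :: zs) = List.takeWhile p xs := by
  induction xs with
  | nil => simp [List.takeWhile_cons, hy]
  | cons x xs ih =>
    by_cases hx : p x <;> simp [List.takeWhile_cons, hx, ih]

-- the last word produced by split₀.go on a string ending in non-whitespace
theorem split₀_go_last (s : List Char) : ∀ (cur : List Char) (acc : List (List Char)),
    s ≠ [] → (∀ x ∈ s.getLast?, PySem.Chars.isspace x = false) →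
    (∀ x ∈ cur, PySem.Chars.isspace x = false) →
    ∃ pre, PySem.Chars.split₀.go s cur acc =
      pre ++ [((cur.reverse ++ s).reverse.takeWhile (fun c => !PySem.Chars.isspace c)).reverse] := by
  induction s with
  | nil => intro _ _ h; exact absurd rfl h
  | cons c rest ih =>
    intro cur acc _ hlast hcur
    by_cases hrest : rest = []
    · subst hrest
      have hc : PySem.Chars.isspace c = false := hlast c (by simp)
      refine ⟨acc.reverse, ?_⟩
      have hall : List.takeWhile (fun c => !PySem.Chars.isspace c) (c :: cur) = c :: cur := by
        refine List.takeWhile_eq_self_iff.mpr ?_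
        intro x hx
        rcases List.mem_cons.mp hx with h | h
        · simp [h, hc]
        · simp [hcur x h]
      simp [PySem.Chars.split₀.go, hc, hall]
    · have hlast' : ∀ x ∈ rest.getLast?, PySem.Chars.isspace x = false := by
        obtain ⟨r, rs, hr⟩ := List.exists_cons_of_ne_nil hrest
        subst hr
        simpa [List.getLast?_cons_cons] using hlast
      by_cases hc : PySem.Chars.isspace c
      · have hw : ∀ (acc' : List (List Char)), ∃ pre, PySem.Chars.split₀.go rest [] acc' =
            pre ++ [((cur.reverse ++ c :: rest).reverse.takeWhile (fun c => !PySem.Chars.isspace c)).reverse] := by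
          intro acc'
          obtain ⟨pre, hpre⟩ := ih [] acc' hrest hlast' (by simp)
          refine ⟨pre, ?_⟩
          rw [hpre]
          have h1 : (cur.reverse ++ c :: rest).reverse = rest.reverse ++ c :: cur := by simp
          have h2 : (([] : List Char).reverse ++ rest).reverse = rest.reverse := by simp
          rw [h1, h2, takeWhile_append_cons_of_neg _ _ (by simp [hc])]
        by_cases hce : cur.isEmpty
        · obtain ⟨pre, hpre⟩ := hw acc
          exact ⟨pre, by simpa [PySem.Chars.split₀.go, hc, hce] using hpre⟩
        · obtain ⟨pre, hpre⟩ := hw (cur.reverse :: acc)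
          exact ⟨pre, by simpa [PySem.Chars.split₀.go, hc, hce] using hpre⟩
      · obtain ⟨pre, hpre⟩ := ih (c :: cur) acc hrest hlast'
          (by intro x hx; rcases List.mem_cons.mp hx with h | h
              · simp [h, hc]
              · exact hcur x h)
        refine ⟨pre, ?_⟩
        rw [show PySem.Chars.split₀.go (c :: rest) cur acc = PySem.Chars.split₀.go rest (c :: cur) acc
              by simp [PySem.Chars.split₀.go, hc]]
        rw [hpre]
        have : (c :: cur).reverse ++ rest = cur.reverse ++ c :: rest := by simp
        rw [this]

-- the index both programs compute, stated in B's form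
theorem i_eq (left : List Char) :
    dpwLoop2 left (dpwLoop1 left left.length) =
    (match (PySem.Chars.split₀ (PySem.Chars.rstrip left)).getLast? with
     | none => 0
     | some w => (PySem.Chars.rstrip left).length - w.length) := by
  generalize ht : PySem.Chars.rstrip left = t
  have htrev : t.reverse = left.reverse.dropWhile PySem.Chars.isspace := by
    rw [← ht]; simp [PySem.Chars.rstrip]
  have hlen1 : dpwLoop1 left left.length = t.length := by
    rw [dpwLoop1_eq, ← htrev, List.length_reverse]
  have hsplitL : left = t ++ (left.reverse.takeWhile PySem.Chars.isspace).reverse := by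
    have h := List.takeWhile_append_dropWhile (p := PySem.Chars.isspace) (l := left.reverse)
    rw [← htrev] at h
    have h2 := congrArg List.reverse h
    simp at h2
    exact h2.symm
  have hA : dpwLoop2 left (dpwLoop1 left left.length)
      = (t.reverse.dropWhile (fun c => !PySem.Chars.isspace c)).length := by
    rw [hlen1, ← dpwLoop2_eq]
    conv_lhs => rw [hsplitL]
    exact dpwLoop2_append t _ t.length le_rfl
  by_cases htnil : t = []
  · subst htnil
    simpa using hA
  · have hlast : ∀ x ∈ t.getLast?, PySem.Chars.isspace x = false := by
      intro x hx
      rw [← List.head?_reverse, htrev] at hx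
      have hne : left.reverse.dropWhile PySem.Chars.isspace ≠ [] := by
        rw [← htrev]; simpa using htnil
      have h1 : ((left.reverse.dropWhile PySem.Chars.isspace).head hne) = x :=
        Option.some.inj ((List.head?_eq_head hne).symm.trans (Option.mem_def.mp hx))
      rw [← h1]
      exact List.head_dropWhile_not PySem.Chars.isspace hne
    obtain ⟨pre, hpre⟩ := split₀_go_last t [] [] htnil hlast (by simp)
    have hgl : (PySem.Chars.split₀ t).getLast?
        = some ((t.reverse.takeWhile (fun c => !PySem.Chars.isspace c)).reverse) := by
      rw [PySem.Chars.split₀, hpre]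
      simpa using List.getLast?_concat
    rw [hgl, hA]
    have hlen := congrArg List.length (List.takeWhile_append_dropWhile
      (p := fun c => !PySem.Chars.isspace c) (l := t.reverse))
    rw [List.length_append] at hlen
    simp only [List.length_reverse] at hlen ⊢
    rw [← hlen, Nat.add_sub_cancel_left]

-- ===== VERDICT (by name: the statement is the Claim_ definition above) =====
theorem delete_prev_word_spec : Claim_equal_delete_prev_word := by
  intro input_buffer cursor_pos _
  unfold Spec_delete_prev_word delete_prev_word delete_prev_word_alt
  simp only
  split
  · rfl
  · rw [i_eq]
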